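-- pv_equiv track=rewrite | github.com/nrv-framework/NRV | nrv/nmod/results/axons_results.py | count_spike
-- ===== SOURCE A (Python) =====
-- def count_spike(onset_position):
--     """
--     spike counting, just in time compiled. For internal use only.
--     """
--     if len(onset_position) == 0:
--         spike_number = 0
--         return 0
--     else:
--         spike_number = 1
--         for i in range(len(onset_position) - 1):
--             if onset_position[i] == min(onset_position):
--                 if onset_position[i] == onset_position[i + 1]:
--                     spike_number = spike_number + 1
--     return spike_number
-- ===== SOURCE B (Python) =====
-- from itertools import groupby
--
--
-- def count_spike(onset_position):
--     if len(onset_position) == 0: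
--         return 0
--     m = min(onset_position)
--     spike_number = 1
--     for key, grp in groupby(onset_position):
--         if key == m:
--             spike_number += sum(1 for _ in grp) - 1
--     return spike_number
-- ===== Notes on version B (the rewrite author's own statement) =====
-- stated objective: faster
-- what changed: B computes the minimum once and counts via run-length grouping (groupby) instead of A's index loop that recomputes min(onset_position) on every iteration.
import Mathlib
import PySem

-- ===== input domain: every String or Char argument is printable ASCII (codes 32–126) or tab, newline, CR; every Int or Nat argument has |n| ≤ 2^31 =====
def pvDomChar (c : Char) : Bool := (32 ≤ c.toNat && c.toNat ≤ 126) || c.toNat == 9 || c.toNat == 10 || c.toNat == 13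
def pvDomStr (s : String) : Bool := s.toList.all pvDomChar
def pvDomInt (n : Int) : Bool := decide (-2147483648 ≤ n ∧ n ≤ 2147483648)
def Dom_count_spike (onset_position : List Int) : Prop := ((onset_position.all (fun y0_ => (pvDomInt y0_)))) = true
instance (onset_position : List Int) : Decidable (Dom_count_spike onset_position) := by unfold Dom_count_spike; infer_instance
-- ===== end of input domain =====

-- B replaces A's index loop (which recomputes min(onset_position) every iteration) by a
-- single min computation followed by a run-length grouping (groupby) pass.

-- ===== PORT A =====
def count_spike (onset_position : List Int) : Int :=
  if onset_position.length = 0 then 0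
  else
    (PySem.List.pyRange 0 ((onset_position.length : Int) - 1) 1).foldl
      (fun spike_number i =>
        if PySem.List.pyGet? onset_position i
             = PySem.List.min? onset_position (fun y => y) ∧
           PySem.List.pyGet? onset_position i
             = PySem.List.pyGet? onset_position (i + 1)
        then spike_number + 1 else spike_number) 1

-- ===== PORT B =====
-- maximal runs of equal consecutive values, as (value, run length) — itertools.groupby
def pvRuns : List Int → List (Int × Nat)
  | [] => []
  | x :: xs =>
    match pvRuns xs with
    | (y, k) :: t => if x = y then (x, k + 1) :: t else (x, 1) :: (y, k) :: t
    | [] => [(x, 1)]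

def count_spike_alt (onset_position : List Int) : Int :=
  match PySem.List.min? onset_position (fun y => y) with
  | none => 0
  | some m =>
    (pvRuns onset_position).foldl
      (fun spike_number p =>
        if p.1 = m then spike_number + ((p.2 : Int) - 1) else spike_number) 1

-- ===== PRECONDITION & SPEC =====
def Spec_count_spike (onset_position : List Int) (out : Int) : Prop := out = count_spike_alt onset_position
instance (onset_position : List Int) (out : Int) : Decidable (Spec_count_spike onset_position out) := by unfold Spec_count_spike; infer_instance

-- ===== CLAIM (what is proved, stated in full; the proofs are below) =====
def Claim_equal_count_spike : Prop := ∀ (onset_position : List Int), Dom_count_spike onset_position → Spec_count_spike onset_position (count_spike onset_position)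

-- ===== LEMMAS AND PROOFS =====

-- count of adjacent equal pairs whose left element's value (as an option) equals mo
def pvPC (mo : Option Int) : List Int → Int
  | x :: y :: t => (if some x = mo ∧ x = y then 1 else 0) + pvPC mo (y :: t)
  | _ => 0

-- the loop body of A's port, with the min value held fixed
def pvBody (mo : Option Int) (zs : List Int) : Int → Int → Int :=
  fun s i =>
    if PySem.List.pyGet? zs i = mo ∧ PySem.List.pyGet? zs i = PySem.List.pyGet? zs (i + 1)
    then s + 1 else s

lemma pvShift (mo : Option Int) (x : Int) (zs : List Int) (n : Nat) (s : Int) :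
    (PySem.List.pyRange 1 ((n : Int) + 1) 1).foldl (pvBody mo (x :: zs)) s
      = (PySem.List.pyRange 0 (n : Int) 1).foldl (pvBody mo zs) s := by
  rw [PySem.List.pyRange_one 1 ((n : Int) + 1), PySem.List.pyRange_one 0 (n : Int)]
  have h1 : ((n : Int) + 1 - 1).toNat = n := by simp
  have h2 : ((n : Int) - 0).toNat = n := by simp
  rw [h1, h2]
  simp only [List.foldl_map]
  apply PySem.List.foldl_congr_mem
  intro acc k _
  have hg1 : PySem.List.pyGet? (x :: zs) ((1 : Int) + (k : Int))
      = PySem.List.pyGet? zs ((0 : Int) + (k : Int)) := by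
    rw [show (1 : Int) + (k : Int) = ((k : Nat) : Int) + 1 by omega,
        PySem.List.pyGet?_cons_succ,
        show (0 : Int) + (k : Int) = ((k : Nat) : Int) by omega]
  have hg2 : PySem.List.pyGet? (x :: zs) ((1 : Int) + (k : Int) + 1)
      = PySem.List.pyGet? zs ((0 : Int) + (k : Int) + 1) := by
    rw [show (1 : Int) + (k : Int) + 1 = (((k + 1 : Nat)) : Int) + 1 by omega,
        PySem.List.pyGet?_cons_succ,
        show (0 : Int) + (k : Int) + 1 = (((k + 1 : Nat)) : Int) by omega]
  simp only [pvBody, hg1, hg2]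

lemma pvLoopA (mo : Option Int) (zs : List Int) (s : Int) :
    (PySem.List.pyRange 0 ((zs.length : Int) - 1) 1).foldl (pvBody mo zs) s
      = s + pvPC mo zs := by
  induction zs generalizing s with
  | nil => simp [PySem.List.pyRange, pvPC]
  | cons x zs ih =>
    cases zs with
    | nil =>
      show (PySem.List.pyRange 0 ((1 : Int) - 1) 1).foldl _ s = s + pvPC mo [x]
      rw [show (1 : Int) - 1 = 0 from by ring, PySem.List.pyRange_one_eq_nil (by norm_num)]
      simp [pvPC]
    | cons y t =>
      have hlen : ((x :: y :: t).length : Int) - 1 = (t.length : Int) + 1 := by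
        push_cast [List.length_cons]; ring
      rw [hlen, PySem.List.pyRange_one_cons (by positivity), List.foldl_cons,
          show (0 : Int) + 1 = 1 from by norm_num]
      have h0 : pvBody mo (x :: y :: t) s 0
          = if some x = mo ∧ x = y then s + 1 else s := by
        simp [pvBody, PySem.List.pyGet?_zero_cons,
              show (0 : Int) + 1 = ((1 : Nat) : Int) by norm_num, eq_comm]
      rw [h0, pvShift mo x (y :: t) t.length]
      have h := ih (s := if some x = mo ∧ x = y then s + 1 else s)
      have hl : ((y :: t).length : Int) - 1 = (t.length : Int) := by simp
      rw [hl] at h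
      rw [h]
      have hp : pvPC mo (x :: y :: t)
          = (if some x = mo ∧ x = y then 1 else 0) + pvPC mo (y :: t) := rfl
      rw [hp]
      split_ifs <;> ring

-- head of pvRuns of a nonempty list carries the head value
lemma pvRuns_cons (y : Int) (t : List Int) :
    ∃ k r, pvRuns (y :: t) = (y, k) :: r := by
  cases h : pvRuns t with
  | nil => exact ⟨1, [], by simp [pvRuns, h]⟩
  | cons p r =>
    by_cases hy : y = p.1
    · exact ⟨p.2 + 1, r, by simp [pvRuns, h, hy]⟩
    · exact ⟨1, p :: r, by simp [pvRuns, h, hy]⟩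

lemma pvSum (m : Int) (xs : List Int) :
    ((pvRuns xs).map (fun p => if p.1 = m then ((p.2 : Int) - 1) else 0)).sum
      = pvPC (some m) xs := by
  induction xs with
  | nil => simp [pvRuns, pvPC]
  | cons x xs ih =>
    cases xs with
    | nil =>
      show ([(x, 1)].map (fun p => if p.1 = m then ((p.2 : Int) - 1) else 0)).sum
          = pvPC (some m) [x]
      simp [pvPC]
    | cons y t =>
      obtain ⟨k, r, hr⟩ := pvRuns_cons y t
      have hx : pvRuns (x :: y :: t)
          = if x = y then (x, k + 1) :: r else (x, 1) :: (y, k) :: r := by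
        conv_lhs => rw [pvRuns, hr]
      rw [hx]
      by_cases hxy : x = y
      · subst hxy
        rw [if_pos rfl]
        rw [hr] at ih
        rw [List.map_cons, List.sum_cons] at ih ⊢
        have hp : pvPC (some m) (x :: x :: t)
            = (if some x = some m ∧ x = x then 1 else 0) + pvPC (some m) (x :: t) := rfl
        rw [hp, ← ih]
        by_cases hm : x = m
        · rw [if_pos hm, if_pos (by exact ⟨by rw [hm], rfl⟩), if_pos hm]
          push_cast; ring
        · rw [if_neg hm, if_neg hm, if_neg (by simp [hm])]
          ring
      · rw [if_neg hxy, List.map_cons, List.sum_cons, ← hr, ih]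
        have hp : pvPC (some m) (x :: y :: t)
            = (if some x = some m ∧ x = y then 1 else 0) + pvPC (some m) (y :: t) := rfl
        rw [hp, if_neg (show ¬(some x = some m ∧ x = y) by simp [hxy])]
        split_ifs <;> simp

lemma pvLoopB (m : Int) (xs : List Int) (s : Int) :
    (pvRuns xs).foldl
        (fun n (p : Int × Nat) => if p.1 = m then n + ((p.2 : Int) - 1) else n) s
      = s + pvPC (some m) xs := by
  rw [show (fun n (p : Int × Nat) => if p.1 = m then n + ((p.2 : Int) - 1) else n)
        = (fun n (p : Int × Nat) => n + (if p.1 = m then ((p.2 : Int) - 1) else 0)) from by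
      funext n p; split_ifs <;> ring]
  rw [PySem.List.foldl_add, pvSum]

-- ===== VERDICT (by name: the statement is the Claim_ definition above) =====
theorem count_spike_spec : Claim_equal_count_spike := by
  intro xs _
  unfold Spec_count_spike count_spike count_spike_alt
  cases xs with
  | nil => rfl
  | cons x t =>
    have hne : (x :: t : List Int) ≠ [] := by simp
    obtain ⟨m, hm⟩ : ∃ m, PySem.List.min? (x :: t) (fun y => y) = some m := by
      cases h : PySem.List.min? (x :: t) (fun y => y) with
      | none => rw [PySem.List.min?_eq_none_iff] at h; exact absurd h hne
      | some m => exact ⟨m, rfl⟩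
    rw [if_neg (by simp), hm]
    exact (pvLoopA (some m) (x :: t) 1).trans (pvLoopB m (x :: t) 1).symm
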